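-- pv_equiv track=rewrite | github.com/ab126/NRE | src/archive/network_nb_archive.py | _get_binary_counts
-- ===== SOURCE A (Python) =====
-- def _get_binary_counts(samples, i, j):
--     """Returns joint counts (!A, A vs !B, B) table from samples. A and B appear at i and j indices"""
--     counts = [[0, 0], [0, 0]]
--     for obs in samples:
--         if obs[i] == '0':
--             if obs[j] == '0':
--                 counts[0][0] += 1
--             else:
--                 counts[0][1] += 1
--         else:
--             if obs[j] == '0':
--                 counts[1][0] += 1
--             else:
--                 counts[1][1] += 1
--     return counts
-- ===== SOURCE B (Python) =====
-- def _get_binary_counts(samples, i, j):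
--     """Returns joint counts (!A, A vs !B, B) table from samples. A and B appear at i and j indices"""
--     cells = [2 * (obs[i] != '0') + (obs[j] != '0') for obs in samples]
--     return [[cells.count(0), cells.count(1)],
--             [cells.count(2), cells.count(3)]]
-- ===== Notes on version B (the rewrite author's own statement) =====
-- stated objective: alternative
-- what changed: B first maps every sample to a cell index 0-3 (2*A+B) and then builds the table by counting occurrences of each index in that list (map-then-count, four counting passes), instead of A's single pass that branches and increments one of four table cells per sample.
import Mathlib
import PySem

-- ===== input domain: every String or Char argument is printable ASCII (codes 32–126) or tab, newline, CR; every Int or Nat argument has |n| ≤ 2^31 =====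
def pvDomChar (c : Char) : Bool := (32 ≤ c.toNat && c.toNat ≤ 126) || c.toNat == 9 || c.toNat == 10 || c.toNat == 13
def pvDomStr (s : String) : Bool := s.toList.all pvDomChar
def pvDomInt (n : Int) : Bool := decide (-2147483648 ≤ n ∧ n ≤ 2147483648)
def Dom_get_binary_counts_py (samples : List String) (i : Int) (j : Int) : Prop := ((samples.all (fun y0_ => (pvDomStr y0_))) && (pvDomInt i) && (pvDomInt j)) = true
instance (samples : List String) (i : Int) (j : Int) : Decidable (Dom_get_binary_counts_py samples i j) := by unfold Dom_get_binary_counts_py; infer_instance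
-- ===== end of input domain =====

-- ===== PORT A =====
-- B maps each sample to a cell index 0..3 and builds the table by counting each
-- index in that list (map-then-count), instead of A's per-sample branch-and-increment
-- loop; alternative decomposition, same cost. Equality of return values.
-- obs[k] is PySem.Str.pyGet? (none = IndexError, excluded by Pre_).
def pvChar (obs : String) (k : Int) : Char := (PySem.Str.pyGet? obs k).getD '!'

-- loop body of A, one sample; table as pair of pairs ((c00,c01),(c10,c11))
def pvAStep (i j : Int) (c : (Int × Int) × (Int × Int)) (obs : String) : (Int × Int) × (Int × Int) :=
  if pvChar obs i = '0' then
    if pvChar obs j = '0' then ((c.1.1 + 1, c.1.2), c.2)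
    else ((c.1.1, c.1.2 + 1), c.2)
  else
    if pvChar obs j = '0' then (c.1, (c.2.1 + 1, c.2.2))
    else (c.1, (c.2.1, c.2.2 + 1))

def get_binary_counts_py (samples : List String) (i : Int) (j : Int) : List (List Int) :=
  let c := samples.foldl (pvAStep i j) ((0, 0), (0, 0))
  [[c.1.1, c.1.2], [c.2.1, c.2.2]]

-- ===== PORT B =====
-- cell index of one sample: 2*(obs[i] != '0') + (obs[j] != '0')
def pvCell (i j : Int) (obs : String) : Int :=
  2 * (if pvChar obs i != '0' then 1 else 0) + (if pvChar obs j != '0' then 1 else 0)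

def get_binary_counts_py_alt (samples : List String) (i : Int) (j : Int) : List (List Int) :=
  let cells := samples.map (pvCell i j)
  [[PySem.List.count cells 0, PySem.List.count cells 1],
   [PySem.List.count cells 2, PySem.List.count cells 3]]

-- ===== PRECONDITION & SPEC =====
-- A raises IndexError when some sample has i or j outside Python's index range; excluded here.
def Pre_get_binary_counts_py (samples : List String) (i : Int) (j : Int) : Prop :=
  ∀ obs ∈ samples, PySem.Raise.InRange obs.length i ∧ PySem.Raise.InRange obs.length j
instance (samples : List String) (i : Int) (j : Int) : Decidable (Pre_get_binary_counts_py samples i j) := by unfold Pre_get_binary_counts_py; infer_instance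
def pvWitness_get_binary_counts_py : List String × Int × Int := (["01", "11", "00"], 0, 1)

def Spec_get_binary_counts_py (samples : List String) (i : Int) (j : Int) (out : List (List Int)) : Prop := out = get_binary_counts_py_alt samples i j
instance (samples : List String) (i : Int) (j : Int) (out : List (List Int)) : Decidable (Spec_get_binary_counts_py samples i j out) := by unfold Spec_get_binary_counts_py; infer_instance

-- ===== CLAIM (what is proved, stated in full; the proofs are below) =====
def Claim_equal_get_binary_counts_py : Prop := ∀ (samples : List String) (i : Int) (j : Int), Dom_get_binary_counts_py samples i j → Pre_get_binary_counts_py samples i j → Spec_get_binary_counts_py samples i j (get_binary_counts_py samples i j)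

-- ===== LEMMAS AND PROOFS =====
-- A's fold from an arbitrary table equals that table plus the four cell counts.
theorem pv_fold (i j : Int) (samples : List String) (c : (Int × Int) × (Int × Int)) :
    samples.foldl (pvAStep i j) c =
      ((c.1.1 + PySem.List.count (samples.map (pvCell i j)) 0,
        c.1.2 + PySem.List.count (samples.map (pvCell i j)) 1),
       (c.2.1 + PySem.List.count (samples.map (pvCell i j)) 2,
        c.2.2 + PySem.List.count (samples.map (pvCell i j)) 3)) := by
  induction samples generalizing c with
  | nil => simp [PySem.List.count]
  | cons obs rest ih =>
    rw [List.foldl_cons, ih]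
    by_cases hi : pvChar obs i = '0' <;> by_cases hj : pvChar obs j = '0' <;>
      simp [pvAStep, pvCell, PySem.List.count, hi, hj, Prod.ext_iff] <;> omega

-- ===== VERDICT (by name: the statement is the Claim_ definition above) =====
theorem get_binary_counts_py_spec : Claim_equal_get_binary_counts_py := by
  intro samples i j _ _
  unfold Spec_get_binary_counts_py get_binary_counts_py get_binary_counts_py_alt
  rw [pv_fold]
  simp
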